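-- pv_equiv track=rewrite | github.com/jamesWalker55/comfyui-various | comfyui_info_hash.py | calculate_batches
-- ===== SOURCE A (Python) =====
-- def calculate_batches(
--     i_start: int,  # start of i
--     i_stop: int,  # end of i, excludes end
--     range_starts: int,  # scene cuts, batch will be terminated before this
--     max_batch_size: int,  # maximum length of batch
-- ):
--     """
--     :param int i_start: start of i
--     :param int i_stop: end of i, excludes end
--     :param int range_starts: scene cuts, batch will be terminated before this
--     :param int max_batch_size: maximum length of batch
--     :return: a list of 2-tuples, each represents (batch start frame, batch stop frame), where stop frame is exclusive
--     """
--     batch_starts: list[int] = []  # also includes end frame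
--     i = i_start - 1
--     counter = -1
--     while True:
--         i += 1
--         counter += 1
--         if i >= i_stop:
--             batch_starts.append(i)
--             break
--
--         if i in range_starts:
--             batch_starts.append(i)
--             counter = 0
--             continue
--
--         if counter >= max_batch_size:
--             batch_starts.append(i)
--             counter = 0
--             continue
--
--         if counter == 0:
--             batch_starts.append(i)
--             continue
--
--     batches = list(zip(batch_starts[:-1], batch_starts[1:]))
--
--     return batches
-- ===== SOURCE B (Python) =====
-- def calculate_batches(
--     i_start: int,
--     i_stop: int,
--     range_starts,
--     max_batch_size: int,
-- ):
--     # Jump from batch boundary to batch boundary arithmetically instead of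
--     # scanning every frame: sort the relevant scene cuts once, then emit
--     # fixed-stride chunks inside each cut-delimited segment.
--     cuts = sorted({c for c in range_starts if i_start < c < i_stop})
--     batches = []
--     a = i_start
--     for c in cuts + [i_stop]:
--         while a < c:
--             b = min(a + max(max_batch_size, 1), c)
--             batches.append((a, b))
--             a = b
--     return batches
-- ===== Notes on version B (the rewrite author's own statement) =====
-- stated objective: alternative
-- what changed: Instead of scanning every frame with a per-frame linear membership test in range_starts, B sorts the relevant scene cuts once and jumps arithmetically from batch boundary to batch boundary (fixed-stride chunks inside each cut-delimited segment).
import Mathlib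
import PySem

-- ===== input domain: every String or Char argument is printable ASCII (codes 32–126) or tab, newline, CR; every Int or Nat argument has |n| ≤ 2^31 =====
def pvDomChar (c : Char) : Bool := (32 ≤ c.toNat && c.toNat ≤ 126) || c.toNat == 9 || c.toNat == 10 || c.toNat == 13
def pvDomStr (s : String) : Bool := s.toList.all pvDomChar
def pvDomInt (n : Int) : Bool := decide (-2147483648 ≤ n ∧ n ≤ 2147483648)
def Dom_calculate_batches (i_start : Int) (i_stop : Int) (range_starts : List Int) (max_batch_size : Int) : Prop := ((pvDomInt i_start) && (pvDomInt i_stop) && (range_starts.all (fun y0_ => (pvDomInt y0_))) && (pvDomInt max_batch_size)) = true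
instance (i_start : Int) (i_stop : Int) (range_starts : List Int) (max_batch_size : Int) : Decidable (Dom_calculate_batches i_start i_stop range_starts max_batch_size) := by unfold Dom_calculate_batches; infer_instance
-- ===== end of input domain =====

-- B replaces A's per-frame scan (with a linear `in range_starts` test each frame) by sorting the
-- relevant cuts once and emitting batch boundaries arithmetically, segment by segment (alternative algorithm).

-- ===== PORT A =====
-- the `while True` loop of A; the Python mutations `i += 1; counter += 1` at the top of the body
-- appear as `i + 1` / `counter + 1` throughout the body
def pyLoopA (i_stop : Int) (range_starts : List Int) (max_batch_size : Int)
    (i counter : Int) (batch_starts : List Int) : List Int :=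
  if i + 1 ≥ i_stop then batch_starts ++ [i + 1]
  else if (i + 1) ∈ range_starts then
    pyLoopA i_stop range_starts max_batch_size (i + 1) 0 (batch_starts ++ [i + 1])
  else if counter + 1 ≥ max_batch_size then
    pyLoopA i_stop range_starts max_batch_size (i + 1) 0 (batch_starts ++ [i + 1])
  else if counter + 1 = 0 then
    pyLoopA i_stop range_starts max_batch_size (i + 1) (counter + 1) (batch_starts ++ [i + 1])
  else
    pyLoopA i_stop range_starts max_batch_size (i + 1) (counter + 1) batch_starts
termination_by (i_stop - i).toNat
decreasing_by all_goals omega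

def calculate_batches (i_start : Int) (i_stop : Int) (range_starts : List Int) (max_batch_size : Int) : List (Int × Int) :=
  let batch_starts := pyLoopA i_stop range_starts max_batch_size (i_start - 1) (-1) []
  -- list(zip(batch_starts[:-1], batch_starts[1:]))
  List.zip (PySem.List.slice batch_starts none (some (-1))) (PySem.List.slice batch_starts (some 1) none)

-- ===== PORT B =====
-- sorted({c for c in range_starts if i_start < c < i_stop})
def cutsB (i_start i_stop : Int) (range_starts : List Int) : List Int :=
  PySem.List.sorted (PySem.Set.ofList (range_starts.filter (fun c => decide (i_start < c) && decide (c < i_stop)))) (fun x => x) false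

-- the inner `while a < c` loop of B (Source B inlines m = max(max_batch_size, 1) in the min)
def altInner (max_batch_size c a : Int) (batches : List (Int × Int)) : Int × List (Int × Int) :=
  if a < c then
    altInner max_batch_size c (min (a + max max_batch_size 1) c)
      (batches ++ [(a, min (a + max max_batch_size 1) c)])
  else (a, batches)
termination_by (c - a).toNat
decreasing_by omega

-- the outer `for c in cuts + [i_stop]` loop of B
def altOuter (max_batch_size : Int) (cs : List Int) (a : Int) (batches : List (Int × Int)) : List (Int × Int) :=
  match cs with
  | [] => batches
  | c :: rest =>
      altOuter max_batch_size rest (altInner max_batch_size c a batches).1 (altInner max_batch_size c a batches).2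

def calculate_batches_alt (i_start : Int) (i_stop : Int) (range_starts : List Int) (max_batch_size : Int) : List (Int × Int) :=
  altOuter max_batch_size (cutsB i_start i_stop range_starts ++ [i_stop]) i_start []

-- ===== PRECONDITION & SPEC =====
def Spec_calculate_batches (i_start : Int) (i_stop : Int) (range_starts : List Int) (max_batch_size : Int) (out : List (Int × Int)) : Prop := out = calculate_batches_alt i_start i_stop range_starts max_batch_size
instance (i_start : Int) (i_stop : Int) (range_starts : List Int) (max_batch_size : Int) (out : List (Int × Int)) : Decidable (Spec_calculate_batches i_start i_stop range_starts max_batch_size out) := by unfold Spec_calculate_batches; infer_instance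

-- ===== CLAIM (what is proved, stated in full; the proofs are below) =====
def Claim_equal_calculate_batches : Prop := ∀ (i_start : Int) (i_stop : Int) (range_starts : List Int) (max_batch_size : Int), Dom_calculate_batches i_start i_stop range_starts max_batch_size → Spec_calculate_batches i_start i_stop range_starts max_batch_size (calculate_batches i_start i_stop range_starts max_batch_size)

-- ===== LEMMAS AND PROOFS =====

-- first element of F strictly greater than s (F sorted strictly increasing), default `stop`
def firstGt (F : List Int) (stop s : Int) : Int :=
  ((F.filter (fun c => decide (s < c))).headD stop)

-- the next batch boundary after a boundary s
def nextB (F : List Int) (mbs stop s : Int) : Int :=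
  min (s + max mbs 1) (firstGt F stop s)

lemma firstGt_cases (F : List Int) (stop s : Int) :
    firstGt F stop s = stop ∨ (firstGt F stop s ∈ F ∧ s < firstGt F stop s) := by
  unfold firstGt
  rcases hf : F.filter (fun c => decide (s < c)) with _ | ⟨h0, t⟩
  · left; rfl
  · right
    have h0m : h0 ∈ F.filter (fun c => decide (s < c)) := by rw [hf]; exact List.mem_cons_self
    have := List.mem_filter.mp h0m
    simp at this
    simpa [hf] using this

lemma firstGt_le (F : List Int) (hF : F.Pairwise (· < ·)) (stop s x : Int)
    (hx : x ∈ F) (hsx : s < x) : firstGt F stop s ≤ x := by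
  unfold firstGt
  have hx' : x ∈ F.filter (fun c => decide (s < c)) := List.mem_filter.mpr ⟨hx, by simpa⟩
  rcases hf : F.filter (fun c => decide (s < c)) with _ | ⟨h0, t⟩
  · rw [hf] at hx'; simp at hx'
  · have hp : (h0 :: t).Pairwise (fun a b : Int => a < b) := by
      rw [← hf]; exact hF.sublist List.filter_sublist
    rw [hf] at hx'
    rcases List.mem_cons.mp hx' with rfl | hmem
    · simp
    · simpa [hf] using le_of_lt ((List.pairwise_cons.mp hp).1 x hmem)

lemma lt_nextB (F : List Int) (mbs stop s : Int) (h : s < stop) : s < nextB F mbs stop s := by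
  unfold nextB
  rcases firstGt_cases F stop s with hc | ⟨_, hgt⟩ <;> omega

-- first F-element above a is exactly c when no F-element lies strictly between a and c
lemma firstGt_eq (F : List Int) (hF : F.Pairwise (· < ·)) (stop a c : Int)
    (hc : c = stop ∨ c ∈ F) (hFlt : ∀ x ∈ F, x < stop)
    (H : ∀ x ∈ F, a < x → c ≤ x) (hac : a < c) (hcs : c ≤ stop) :
    firstGt F stop a = c := by
  rcases firstGt_cases F stop a with he | ⟨hmem, hgt⟩
  · rcases hc with rfl | hcF
    · exact he
    · have h1 := firstGt_le F hF stop a c hcF hac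
      have h2 := hFlt c hcF
      omega
  · have h1 : c ≤ firstGt F stop a := H _ hmem hgt
    rcases hc with rfl | hcF
    · have := hFlt _ hmem; omega
    · have h2 := firstGt_le F hF stop a c hcF hac
      omega

lemma mem_cutsB (i_start stop : Int) (rs : List Int) (x : Int) :
    x ∈ cutsB i_start stop rs ↔ x ∈ rs ∧ i_start < x ∧ x < stop := by
  simp [cutsB, PySem.List.mem_sorted, PySem.Set.mem_ofList, List.mem_filter]

lemma pairwise_cutsB (i_start stop : Int) (rs : List Int) :
    (cutsB i_start stop rs).Pairwise (· < ·) :=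
  PySem.List.sorted_ofList_pairwise_lt _

-- the list of batch starts from boundary a, ended by the sentinel `stop`
def specStarts (F : List Int) (mbs stop a : Int) : List Int :=
  if _h : a < stop then
    (if stop ≤ nextB F mbs stop a then [a, stop]
     else a :: specStarts F mbs stop (nextB F mbs stop a))
  else [a]
termination_by (stop - a).toNat
decreasing_by have := lt_nextB F mbs stop a _h; omega

-- the batch list from boundary a
def specBatches (F : List Int) (mbs stop a : Int) : List (Int × Int) :=
  if _h : a < stop then
    (a, min (nextB F mbs stop a) stop) :: specBatches F mbs stop (min (nextB F mbs stop a) stop)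
  else []
termination_by (stop - a).toNat
decreasing_by have := lt_nextB F mbs stop a _h; omega

-- ===== A side =====

lemma A_loop (i_start stop : Int) (rs : List Int) (mbs : Int) :
    ∀ (n : Nat) (i s : Int) (acc : List Int), (stop - i).toNat ≤ n → i_start ≤ s → s ≤ i → i < stop →
      i < nextB (cutsB i_start stop rs) mbs stop s →
      pyLoopA stop rs mbs i (i - s) acc
        = acc ++ (if stop ≤ nextB (cutsB i_start stop rs) mbs stop s then [stop]
                  else specStarts (cutsB i_start stop rs) mbs stop (nextB (cutsB i_start stop rs) mbs stop s)) := by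
  intro n
  induction n with
  | zero => intro i s acc hn _ _ hstop _; omega
  | succ n ih =>
    intro i s acc hn hs1 hs2 hstop hlt
    have hF := pairwise_cutsB i_start stop rs
    rw [pyLoopA]
    by_cases h1 : i + 1 ≥ stop
    · rw [if_pos h1, if_pos (show stop ≤ nextB (cutsB i_start stop rs) mbs stop s by omega),
        show i + 1 = stop by omega]
    · rw [if_neg h1]
      -- shared continuation once the next boundary is exactly i + 1
      have key : nextB (cutsB i_start stop rs) mbs stop s = i + 1 →
          pyLoopA stop rs mbs (i + 1) 0 (acc ++ [i + 1])
            = acc ++ (if stop ≤ nextB (cutsB i_start stop rs) mbs stop s then [stop]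
                      else specStarts (cutsB i_start stop rs) mbs stop (nextB (cutsB i_start stop rs) mbs stop s)) := by
        intro heq
        have hrec := ih (i + 1) (i + 1) (acc ++ [i + 1]) (by omega) (by omega) le_rfl
          (by omega) (lt_nextB _ mbs stop (i + 1) (by omega))
        rw [show (0 : Int) = (i + 1) - (i + 1) by ring, hrec, heq,
          if_neg (show ¬ stop ≤ i + 1 by omega)]
        conv_rhs => rw [specStarts]
        rw [dif_pos (show i + 1 < stop by omega)]
        by_cases h5 : stop ≤ nextB (cutsB i_start stop rs) mbs stop (i + 1)
        · rw [if_pos h5, if_pos h5]; simp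
        · rw [if_neg h5, if_neg h5]; simp
      by_cases h2 : (i + 1) ∈ rs
      · rw [if_pos h2]
        have hmemF : (i + 1) ∈ cutsB i_start stop rs :=
          (mem_cutsB i_start stop rs (i + 1)).mpr ⟨h2, by omega, by omega⟩
        have hfle := firstGt_le (cutsB i_start stop rs) hF stop s (i + 1) hmemF (by omega)
        have hub : nextB (cutsB i_start stop rs) mbs stop s ≤ firstGt (cutsB i_start stop rs) stop s := by
          unfold nextB; exact min_le_right _ _
        exact key (by omega)
      · rw [if_neg h2]
        by_cases h3 : i - s + 1 ≥ mbs
        · rw [if_pos h3]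
          have hmle : max mbs 1 ≤ i + 1 - s := max_le (by omega) (by omega)
          have hub : nextB (cutsB i_start stop rs) mbs stop s ≤ s + max mbs 1 := by
            unfold nextB; exact min_le_left _ _
          exact key (by omega)
        · rw [if_neg h3, if_neg (show ¬ i - s + 1 = 0 by omega)]
          have hstrict : i + 1 < nextB (cutsB i_start stop rs) mbs stop s := by
            have hmax_gt : i + 1 < s + max mbs 1 := by
              rcases max_cases mbs 1 with ⟨hm, _⟩ | ⟨hm, _⟩ <;> omega
            have hnb_cases : nextB (cutsB i_start stop rs) mbs stop s = s + max mbs 1 ∨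
                nextB (cutsB i_start stop rs) mbs stop s = firstGt (cutsB i_start stop rs) stop s := by
              unfold nextB
              rcases min_cases (s + max mbs 1) (firstGt (cutsB i_start stop rs) stop s) with
                ⟨hm, _⟩ | ⟨hm, _⟩
              · exact Or.inl hm
              · exact Or.inr hm
            rcases hnb_cases with hnb | hnb
            · omega
            · rcases firstGt_cases (cutsB i_start stop rs) stop s with he | ⟨hmem, _⟩
              · omega
              · have hne : firstGt (cutsB i_start stop rs) stop s ≠ i + 1 := by
                  intro hcontra
                  exact h2 ((mem_cutsB i_start stop rs _).mp (hcontra ▸ hmem)).1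
                omega
          rw [show i - s + 1 = (i + 1) - s by ring]
          exact ih (i + 1) s acc (by omega) hs1 (by omega) (by omega) hstrict

lemma A_starts (i_start stop : Int) (rs : List Int) (mbs : Int) (h : i_start < stop) :
    pyLoopA stop rs mbs (i_start - 1) (-1) [] = specStarts (cutsB i_start stop rs) mbs stop i_start := by
  have hcall : pyLoopA stop rs mbs i_start 0 ([] ++ [i_start])
      = [] ++ [i_start] ++ (if stop ≤ nextB (cutsB i_start stop rs) mbs stop i_start then [stop]
          else specStarts (cutsB i_start stop rs) mbs stop (nextB (cutsB i_start stop rs) mbs stop i_start)) := by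
    rw [show (0 : Int) = i_start - i_start by ring]
    exact A_loop i_start stop rs mbs (stop - i_start).toNat i_start i_start ([] ++ [i_start])
      le_rfl le_rfl le_rfl h (lt_nextB _ mbs stop i_start h)
  rw [pyLoopA]
  simp only [sub_add_cancel, neg_add_cancel]
  rw [if_neg (show ¬ i_start ≥ stop by omega)]
  have hrhs : specStarts (cutsB i_start stop rs) mbs stop i_start
      = [] ++ [i_start] ++ (if stop ≤ nextB (cutsB i_start stop rs) mbs stop i_start then [stop]
          else specStarts (cutsB i_start stop rs) mbs stop (nextB (cutsB i_start stop rs) mbs stop i_start)) := by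
    conv_lhs => rw [specStarts]
    rw [dif_pos h]
    split_ifs <;> simp
  rw [hrhs, ← hcall]
  split_ifs with hA hB
  · rfl
  · rfl
  · rfl

lemma specStarts_cons (F : List Int) (mbs stop b : Int) :
    ∃ r, specStarts F mbs stop b = b :: r := by
  rw [specStarts]; split_ifs <;> exact ⟨_, rfl⟩

lemma specBatches_stop (F : List Int) (mbs stop : Int) : specBatches F mbs stop stop = [] := by
  rw [specBatches]; simp

lemma zipAdj_spec (F : List Int) (mbs stop : Int) :
    ∀ (n : Nat) (a : Int), (stop - a).toNat ≤ n → a < stop →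
      List.zip (specStarts F mbs stop a).dropLast (specStarts F mbs stop a).tail
        = specBatches F mbs stop a := by
  intro n
  induction n with
  | zero => intro a hn ha; omega
  | succ n ih =>
    intro a hn ha
    have hnb := lt_nextB F mbs stop a ha
    by_cases hb : stop ≤ nextB F mbs stop a
    · rw [specStarts, specBatches, dif_pos ha, dif_pos ha, if_pos hb,
        min_eq_right hb, specBatches_stop]
      simp
    · obtain ⟨r, hr⟩ := specStarts_cons F mbs stop (nextB F mbs stop a)
      rw [specStarts, dif_pos ha, if_neg hb, hr]
      simp only [List.dropLast_cons₂, List.tail_cons, List.zip_cons_cons]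
      have hih := ih (nextB F mbs stop a) (by omega) (by omega)
      rw [hr] at hih
      simp only [List.tail_cons] at hih
      rw [hih]
      conv_rhs => rw [specBatches]
      rw [dif_pos ha, min_eq_left (by omega)]

-- ===== B side =====

lemma inner_spec (i_start stop mbs : Int) (rs : List Int) (c : Int)
    (hc : c = stop ∨ c ∈ cutsB i_start stop rs) (hcs : c ≤ stop) :
    ∀ (n : Nat) (a : Int) (acc : List (Int × Int)), (c - a).toNat ≤ n → a ≤ c →
      (∀ x ∈ cutsB i_start stop rs, a < x → c ≤ x) →
      (altInner mbs c a acc).1 = c ∧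
      (altInner mbs c a acc).2 ++ specBatches (cutsB i_start stop rs) mbs stop c
        = acc ++ specBatches (cutsB i_start stop rs) mbs stop a := by
  intro n
  induction n with
  | zero =>
    intro a acc hn hac _
    have : a = c := by omega
    subst this
    rw [altInner]
    simp
  | succ n ih =>
    intro a acc hn hac H
    by_cases h : a < c
    · rw [altInner, if_pos h]
      have hm : a < min (a + max mbs 1) c := by omega
      obtain ⟨g1, g2⟩ := ih (min (a + max mbs 1) c) (acc ++ [(a, min (a + max mbs 1) c)])
        (by omega) (by omega)
        (fun x hx hlt => H x hx (by omega))
      refine ⟨g1, ?_⟩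
      rw [g2]
      have hfg : firstGt (cutsB i_start stop rs) stop a = c :=
        firstGt_eq _ (pairwise_cutsB i_start stop rs) stop a c hc
          (fun x hx => ((mem_cutsB i_start stop rs x).mp hx).2.2) H h hcs
      have hspec : specBatches (cutsB i_start stop rs) mbs stop a
          = (a, min (a + max mbs 1) c) :: specBatches (cutsB i_start stop rs) mbs stop (min (a + max mbs 1) c) := by
        rw [specBatches, dif_pos (by omega : a < stop)]
        rw [show nextB (cutsB i_start stop rs) mbs stop a = min (a + max mbs 1) c by
          unfold nextB; rw [hfg]]
        rw [min_eq_left (by omega)]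
      rw [hspec]
      simp
    · have : a = c := by omega
      subst this
      rw [altInner]
      simp

lemma outer_spec (i_start stop mbs : Int) (rs : List Int) :
    ∀ (G : List Int) (a : Int) (acc : List (Int × Int)), G.Sublist (cutsB i_start stop rs) →
      (∀ x ∈ cutsB i_start stop rs, a < x → x ∈ G) → (∀ x ∈ G, a < x) → a ≤ stop →
      altOuter mbs (G ++ [stop]) a acc = acc ++ specBatches (cutsB i_start stop rs) mbs stop a := by
  intro G
  induction G with
  | nil =>
    intro a acc _ hall _ has
    obtain ⟨g1, g2⟩ := inner_spec i_start stop mbs rs stop (Or.inl rfl) le_rfl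
      (stop - a).toNat a acc le_rfl has
      (fun x hx hlt => absurd (hall x hx hlt) (List.not_mem_nil))
    simp only [List.nil_append, altOuter]
    rw [specBatches_stop, List.append_nil] at g2
    rw [g2]
  | cons c G' ihG =>
    intro a acc hsub hall hGgt has
    have hcF : c ∈ cutsB i_start stop rs := hsub.subset List.mem_cons_self
    have hcstop : c < stop := ((mem_cutsB i_start stop rs c).mp hcF).2.2
    have hac : a < c := hGgt c List.mem_cons_self
    have hpairG : (c :: G').Pairwise (fun x y : Int => x < y) :=
      (pairwise_cutsB i_start stop rs).sublist hsub
    have hGgt' : ∀ x ∈ G', c < x := (List.pairwise_cons.mp hpairG).1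
    obtain ⟨g1, g2⟩ := inner_spec i_start stop mbs rs c (Or.inr hcF) (le_of_lt hcstop)
      (c - a).toNat a acc le_rfl (le_of_lt hac)
      (fun x hx hlt => by
        rcases List.mem_cons.mp (hall x hx hlt) with rfl | hx'
        · exact le_refl x
        · exact le_of_lt (hGgt' x hx'))
    simp only [List.cons_append, altOuter]
    rw [g1]
    rw [ihG c (altInner mbs c a acc).2 (List.sublist_of_cons_sublist hsub)
      (fun x hx hlt => by
        rcases List.mem_cons.mp (hall x hx (lt_trans hac hlt)) with rfl | hx'
        · omega
        · exact hx')
      hGgt' (le_of_lt hcstop)]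
    rw [g2]

-- ===== VERDICT (by name: the statement is the Claim_ definition above) =====
theorem calculate_batches_spec : Claim_equal_calculate_batches := by
  intro i_start stop rs mbs _hdom
  unfold Spec_calculate_batches calculate_batches calculate_batches_alt
  by_cases h : i_start < stop
  · rw [A_starts i_start stop rs mbs h]
    simp only [PySem.List.slice_to_neg_one, PySem.List.slice_from_one]
    rw [zipAdj_spec (cutsB i_start stop rs) mbs stop (stop - i_start).toNat i_start le_rfl h]
    rw [outer_spec i_start stop mbs rs (cutsB i_start stop rs) i_start []
      (List.Sublist.refl _) (fun x hx _ => hx)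
      (fun x hx => ((mem_cutsB i_start stop rs x).mp hx).2.1) (le_of_lt h)]
    simp
  · have hA : pyLoopA stop rs mbs (i_start - 1) (-1) [] = [i_start] := by
      rw [pyLoopA]
      simp only [sub_add_cancel]
      rw [if_pos (show i_start ≥ stop by omega)]
      simp
    have hC : cutsB i_start stop rs = [] := by
      apply List.eq_nil_iff_forall_not_mem.mpr
      intro x hx
      rw [mem_cutsB] at hx
      omega
    rw [hA, hC]
    simp only [List.nil_append, altOuter]
    rw [show altInner mbs stop i_start [] = (i_start, []) by rw [altInner]; simp [h]]
    simp [PySem.List.slice_to_neg_one, PySem.List.slice_from_one]
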